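-- pv_equiv track=rewrite | github.com/cloudmesh/cm-burn | cloudmesh/burn/windowssdcard.py | filter_info
-- ===== SOURCE A (Python) =====
-- def filter_info(info=None, args=None, nargs=None):
--     info = info
--     if args is not None:
--         for key, value in args.items():
--             info = [device for device in info if key in device.keys() and device[key] == value]
--
--     if nargs is not None:
--         for key, value in nargs.items():
--             info = [device for device in info if key in device.keys() and device[key] != value]
--
--     return info
-- ===== SOURCE B (Python) =====
-- def filter_info(info=None, args=None, nargs=None):
--     eqs = list(args.items()) if args is not None else []
--     nes = list(nargs.items()) if nargs is not None else []
--     if not eqs and not nes: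
--         return info
--     return [d for d in info
--             if all(k in d and d[k] == v for k, v in eqs)
--             and all(k in d and d[k] != v for k, v in nes)]
-- ===== Notes on version B (the rewrite author's own statement) =====
-- stated objective: simpler
-- what changed: B builds one filtered list in a single pass with a conjunction of all equality and inequality constraints, instead of A's rebuilding of the device list once per constraint key; when there are no constraints the original info (possibly None) is returned unchanged.
import Mathlib
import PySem

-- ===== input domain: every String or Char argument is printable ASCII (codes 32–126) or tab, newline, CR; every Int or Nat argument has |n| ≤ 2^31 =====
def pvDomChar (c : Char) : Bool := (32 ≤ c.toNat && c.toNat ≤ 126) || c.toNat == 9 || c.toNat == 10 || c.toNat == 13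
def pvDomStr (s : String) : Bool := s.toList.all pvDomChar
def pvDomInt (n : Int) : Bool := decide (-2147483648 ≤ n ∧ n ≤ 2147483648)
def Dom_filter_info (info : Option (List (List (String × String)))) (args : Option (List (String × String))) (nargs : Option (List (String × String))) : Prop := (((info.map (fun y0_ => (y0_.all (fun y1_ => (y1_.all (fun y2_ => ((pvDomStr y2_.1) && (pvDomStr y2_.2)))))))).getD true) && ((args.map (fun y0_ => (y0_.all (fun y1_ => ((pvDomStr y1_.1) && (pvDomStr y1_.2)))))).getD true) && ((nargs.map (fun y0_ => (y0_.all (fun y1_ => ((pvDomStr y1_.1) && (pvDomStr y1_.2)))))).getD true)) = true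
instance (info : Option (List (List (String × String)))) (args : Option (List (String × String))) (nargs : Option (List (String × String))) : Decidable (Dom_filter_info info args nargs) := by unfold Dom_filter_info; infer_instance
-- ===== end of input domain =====

-- B replaces A's per-key rebuilding of the device list by a single filter that checks
-- all equality and inequality constraints at once (objective: simpler).

-- ===== PORT A =====
-- 'key in device.keys() and device[key] == value' (devices are Python dicts)
def pvKeepEq (key value : String) (device : List (String × String)) : Bool :=
  (PySem.Dict.ofList device).get? key == some value

-- 'key in device.keys() and device[key] != value'
def pvKeepNe (key value : String) (device : List (String × String)) : Bool :=
  match (PySem.Dict.ofList device).get? key with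
  | some v => v != value
  | none => false

def filter_info (info : Option (List (List (String × String)))) (args : Option (List (String × String))) (nargs : Option (List (String × String))) : Option (List (List (String × String))) :=
  let info1 : Option (List (List (String × String))) :=
    match args with
    | none => info
    | some a =>
        (PySem.Dict.ofList a).items.foldl
          (fun st kv => st.map (fun devices => devices.filter (fun d => pvKeepEq kv.1 kv.2 d))) info
  match nargs with
  | none => info1
  | some n =>
      (PySem.Dict.ofList n).items.foldl
        (fun st kv => st.map (fun devices => devices.filter (fun d => pvKeepNe kv.1 kv.2 d))) info1

-- ===== PORT B =====
def filter_info_alt (info : Option (List (List (String × String)))) (args : Option (List (String × String))) (nargs : Option (List (String × String))) : Option (List (List (String × String))) :=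
  let eqs := (PySem.Dict.ofList (args.getD [])).items
  let nes := (PySem.Dict.ofList (nargs.getD [])).items
  if eqs.isEmpty && nes.isEmpty then info
  else
    info.map (fun devices =>
      devices.filter (fun d =>
        eqs.all (fun kv => pvKeepEq kv.1 kv.2 d) && nes.all (fun kv => pvKeepNe kv.1 kv.2 d)))

-- ===== PRECONDITION & SPEC =====
-- Pre_ excludes exactly the inputs on which the Python A raises TypeError: info is None
-- while a nonempty args or nargs dict is provided (B raises there too).
def Pre_filter_info (info : Option (List (List (String × String)))) (args : Option (List (String × String))) (nargs : Option (List (String × String))) : Prop :=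
  info = none → (args.getD [] = [] ∧ nargs.getD [] = [])
instance (info : Option (List (List (String × String)))) (args : Option (List (String × String))) (nargs : Option (List (String × String))) : Decidable (Pre_filter_info info args nargs) := by unfold Pre_filter_info; infer_instance

def pvWitness_filter_info : (Option (List (List (String × String)))) × (Option (List (String × String))) × (Option (List (String × String))) :=
  (some [[("a", "1")], [("a", "2")]], some [("a", "2")], none)

def Spec_filter_info (info : Option (List (List (String × String)))) (args : Option (List (String × String))) (nargs : Option (List (String × String))) (out : Option (List (List (String × String)))) : Prop := out = filter_info_alt info args nargs
instance (info : Option (List (List (String × String)))) (args : Option (List (String × String))) (nargs : Option (List (String × String))) (out : Option (List (List (String × String)))) : Decidable (Spec_filter_info info args nargs out) := by unfold Spec_filter_info; infer_instance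

-- ===== CLAIM (what is proved, stated in full; the proofs are below) =====
def Claim_equal_filter_info : Prop := ∀ (info : Option (List (List (String × String)))) (args : Option (List (String × String))) (nargs : Option (List (String × String))), Dom_filter_info info args nargs → Pre_filter_info info args nargs → Spec_filter_info info args nargs (filter_info info args nargs)

-- ===== LEMMAS AND PROOFS =====

-- a chain of filters, one per constraint, equals one filter by the conjunction of all constraints
theorem pv_foldl_filter {α β : Type} (p : β → α → Bool) :
    ∀ (cs : List β) (ds : List α),
      cs.foldl (fun acc kv => acc.filter (fun d => p kv d)) ds
        = ds.filter (fun d => cs.all (fun kv => p kv d)) := by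
  intro cs
  induction cs with
  | nil => intro ds; simp
  | cons c cs ih =>
      intro ds
      simp only [List.foldl_cons, ih, List.filter_filter, List.all_cons]
      exact List.filter_congr (fun d _ => by cases h1 : p c d <;> simp_all)

-- the same, with the Option state A threads through its loops
theorem pv_foldl_map_filter {α β : Type} (p : β → α → Bool) :
    ∀ (cs : List β) (st : Option (List α)),
      cs.foldl (fun st kv => st.map (fun ds => ds.filter (fun d => p kv d))) st
        = st.map (fun ds => ds.filter (fun d => cs.all (fun kv => p kv d))) := by
  intro cs st
  cases st with
  | none =>
      induction cs with
      | nil => simp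
      | cons c cs ih => simpa using ih
  | some ds =>
      have hsome : ∀ (cs : List β) (ds : List α),
          cs.foldl (fun st kv => st.map (fun ds => ds.filter (fun d => p kv d))) (some ds)
            = some (cs.foldl (fun acc kv => acc.filter (fun d => p kv d)) ds) := by
        intro cs
        induction cs with
        | nil => intro ds; rfl
        | cons c cs ih =>
            intro ds
            simp only [List.foldl_cons, Option.map_some]
            exact ih _
      rw [hsome, pv_foldl_filter]
      rfl

-- A's two constraint loops equal B's single conjunctive filter
theorem pv_main (info : Option (List (List (String × String))))
    (eqs nes : List (String × String)) :
    nes.foldl (fun st kv => st.map (fun devices => devices.filter (fun d => pvKeepNe kv.1 kv.2 d)))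
      (eqs.foldl (fun st kv => st.map (fun devices => devices.filter (fun d => pvKeepEq kv.1 kv.2 d))) info)
      = if eqs.isEmpty && nes.isEmpty then info
        else info.map (fun devices => devices.filter (fun d =>
          eqs.all (fun kv => pvKeepEq kv.1 kv.2 d) && nes.all (fun kv => pvKeepNe kv.1 kv.2 d))) := by
  rw [pv_foldl_map_filter, pv_foldl_map_filter]
  cases info with
  | none => cases eqs <;> cases nes <;> simp
  | some ds =>
      simp only [Option.map_some, List.filter_filter]
      split_ifs with h
      · rcases List.isEmpty_iff.mp (Bool.and_elim_left h) with rfl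
        rcases List.isEmpty_iff.mp (Bool.and_elim_right h) with rfl
        simp
      · exact congrArg some (List.filter_congr (fun d _ => by
          cases h1 : eqs.all (fun kv => pvKeepEq kv.1 kv.2 d) <;> simp_all))

-- ===== VERDICT (by name: the statement is the Claim_ definition above) =====
theorem filter_info_spec : Claim_equal_filter_info := by
  intro info args nargs _ _
  unfold Spec_filter_info filter_info filter_info_alt
  cases args with
  | none =>
      cases nargs with
      | none => exact pv_main info (PySem.Dict.ofList []).items (PySem.Dict.ofList []).items
      | some n => exact pv_main info (PySem.Dict.ofList []).items (PySem.Dict.ofList n).items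
  | some a =>
      cases nargs with
      | none => exact pv_main info (PySem.Dict.ofList a).items (PySem.Dict.ofList []).items
      | some n => exact pv_main info (PySem.Dict.ofList a).items (PySem.Dict.ofList n).items
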